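-- pv_equiv track=rewrite | github.com/rmotr-group-projects/itp-u3-c2-football-dictionaries | warm_up/assignment_4.py | group_users_by_email_domain
-- ===== SOURCE A (Python) =====
-- def group_users_by_email_domain(users):
--     result = {}
--     emails = []
--
--     for item in users:
--         email = item['email']
--         emails.append(email)
--
--         # @gmail.com
--         if '@gmail.com' in email:
--             gmail = '@gmail.com'
--             email = gmail
--
--         # @yahoo
--         if '@yahoo.com' in email:
--             yahoo = '@yahoo.com'
--             email = yahoo
--
--         # @hotmail
--         if '@hotmail.com' in email:
--             hotmail = '@hotmail.com'
--             email = hotmail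
--
--         result.setdefault(email, [])
--         result[email].append(item)
--
--     return(result)
-- ===== SOURCE B (Python) =====
-- def group_users_by_email_domain(users):
--     def key(item):
--         email = item['email']
--         for domain in ('@gmail.com', '@yahoo.com', '@hotmail.com'):
--             if domain in email:
--                 return domain
--         return email
--     keys = list(dict.fromkeys(key(item) for item in users))
--     return {k: [item for item in users if key(item) == k] for k in keys}
-- ===== Notes on version B (the rewrite author's own statement) =====
-- stated objective: alternative
-- what changed: Replaces the single-pass dict accumulation (setdefault + in-place append, with sequential email reassignment) by a key helper, an ordered dedup of the key stream, and one filter pass per distinct key building the dict comprehension.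
import Mathlib
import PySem

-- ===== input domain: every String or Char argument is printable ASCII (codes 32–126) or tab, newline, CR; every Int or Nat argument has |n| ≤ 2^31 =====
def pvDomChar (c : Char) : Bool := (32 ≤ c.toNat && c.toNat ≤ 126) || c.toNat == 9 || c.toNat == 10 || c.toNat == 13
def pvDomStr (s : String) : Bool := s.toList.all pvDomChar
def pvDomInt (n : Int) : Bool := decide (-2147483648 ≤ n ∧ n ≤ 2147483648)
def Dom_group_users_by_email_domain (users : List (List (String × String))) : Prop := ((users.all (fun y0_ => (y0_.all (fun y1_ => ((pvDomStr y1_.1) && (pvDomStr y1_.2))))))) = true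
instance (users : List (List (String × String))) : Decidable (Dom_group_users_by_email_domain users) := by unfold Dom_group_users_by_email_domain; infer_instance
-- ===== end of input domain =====

-- B replaces A's single-pass setdefault/append dict accumulation by a key helper, an ordered
-- dedup of the key stream and one filter pass per distinct key (alternative decomposition).


-- ===== PORT A =====
-- item['email'] is a first-match lookup in the item's association list; KeyError (missing key)
-- is excluded by Pre_, so the .getD "" default is never reached on admitted inputs.
def group_users_by_email_domain (users : List (List (String × String))) : List (String × List (List (String × String))) :=
  (users.foldl
    (fun (st : PySem.Dict String (List (List (String × String))) × List String) item =>
      let result := st.1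
      let emails := st.2
      let email := ((PySem.Dict.mk item).get? "email").getD ""
      let emails := emails ++ [email]
      let email := if PySem.Str.isIn "@gmail.com" email then "@gmail.com" else email
      let email := if PySem.Str.isIn "@yahoo.com" email then "@yahoo.com" else email
      let email := if PySem.Str.isIn "@hotmail.com" email then "@hotmail.com" else email
      let result := result.setdefault email []
      let result := result.modify email [] (· ++ [item])
      (result, emails))
    (PySem.Dict.empty, [])).1.items


-- ===== PORT B =====
def pvKeyB (item : List (String × String)) : String :=
  let email := ((PySem.Dict.mk item).get? "email").getD ""
  if PySem.Str.isIn "@gmail.com" email then "@gmail.com"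
  else if PySem.Str.isIn "@yahoo.com" email then "@yahoo.com"
  else if PySem.Str.isIn "@hotmail.com" email then "@hotmail.com"
  else email

def group_users_by_email_domain_alt (users : List (List (String × String))) : List (String × List (List (String × String))) :=
  let keys := PySem.List.dedup (users.map pvKeyB)
  keys.map (fun k => (k, users.filter (fun item => pvKeyB item == k)))

-- ===== PRECONDITION & SPEC =====
-- Pre_ excludes items without an 'email' key, on which Python A raises KeyError.
def Pre_group_users_by_email_domain (users : List (List (String × String))) : Prop :=
  users.all (fun item => ((PySem.Dict.mk item).get? "email").isSome) = true
instance (users : List (List (String × String))) : Decidable (Pre_group_users_by_email_domain users) := by unfold Pre_group_users_by_email_domain; infer_instance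
def pvWitness_group_users_by_email_domain : (List (List (String × String))) :=
  ([[("email", "a@gmail.com"), ("name", "A")], [("email", "b@x.org")]])
def Spec_group_users_by_email_domain (users : List (List (String × String))) (out : List (String × List (List (String × String)))) : Prop := out = group_users_by_email_domain_alt users
instance (users : List (List (String × String))) (out : List (String × List (List (String × String)))) : Decidable (Spec_group_users_by_email_domain users out) := by unfold Spec_group_users_by_email_domain; infer_instance

-- ===== CLAIM (what is proved, stated in full; the proofs are below) =====
def Claim_equal_group_users_by_email_domain : Prop := ∀ (users : List (List (String × String))), Dom_group_users_by_email_domain users → Pre_group_users_by_email_domain users → Spec_group_users_by_email_domain users (group_users_by_email_domain users)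

-- ===== LEMMAS AND PROOFS =====

-- A's sequential reassignment chain computes the first matching domain (B's key rule).
theorem pvChain_eq (e : String) :
    (let e1 := if PySem.Str.isIn "@gmail.com" e then "@gmail.com" else e
     let e2 := if PySem.Str.isIn "@yahoo.com" e1 then "@yahoo.com" else e1
     if PySem.Str.isIn "@hotmail.com" e2 then "@hotmail.com" else e2)
    = (if PySem.Str.isIn "@gmail.com" e then "@gmail.com"
       else if PySem.Str.isIn "@yahoo.com" e then "@yahoo.com"
       else if PySem.Str.isIn "@hotmail.com" e then "@hotmail.com" else e) := by
  have hyg : PySem.Str.isIn "@yahoo.com" "@gmail.com" = false := by decide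
  have hhg : PySem.Str.isIn "@hotmail.com" "@gmail.com" = false := by decide
  have hhy : PySem.Str.isIn "@hotmail.com" "@yahoo.com" = false := by decide
  split_ifs <;> simp_all

-- A's per-item dict update (setdefault then in-place append) is one modify.
theorem pvSetdefault_modify (d : PySem.Dict String (List (List (String × String)))) (k : String)
    (x : List (String × String)) :
    (d.setdefault k []).modify k [] (· ++ [x]) = d.modify k [] (· ++ [x]) := by
  by_cases h : d.contains k = true
  · rw [PySem.Dict.setdefault_of_contains d [] h]
  · rw [PySem.Dict.setdefault_of_not_contains d [] (by simpa using h)]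
    unfold PySem.Dict.modify
    rw [PySem.Dict.insert_insert_self, PySem.Dict.getD_insert_self,
        PySem.Dict.getD_of_not_contains d [] (by simpa using h)]

-- The pair-state fold of A projects to a plain modify-fold keyed by pvKeyB.
theorem pvFold_proj (users : List (List (String × String)))
    (d : PySem.Dict String (List (List (String × String)))) (es : List String) :
    (users.foldl
      (fun (st : PySem.Dict String (List (List (String × String))) × List String) item =>
        let result := st.1
        let emails := st.2
        let email := ((PySem.Dict.mk item).get? "email").getD ""
        let emails := emails ++ [email]
        let email := if PySem.Str.isIn "@gmail.com" email then "@gmail.com" else email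
        let email := if PySem.Str.isIn "@yahoo.com" email then "@yahoo.com" else email
        let email := if PySem.Str.isIn "@hotmail.com" email then "@hotmail.com" else email
        let result := result.setdefault email []
        let result := result.modify email [] (· ++ [item])
        (result, emails)) (d, es)).1
    = users.foldl (fun d item => d.modify (pvKeyB item) [] (· ++ [item])) d := by
  induction users generalizing d es with
  | nil => rfl
  | cons item rest ih =>
    simp only [List.foldl_cons]
    rw [ih]
    congr 1
    have := pvChain_eq (((PySem.Dict.mk item).get? "email").getD "")
    simp only at this
    rw [this]
    exact pvSetdefault_modify d (pvKeyB item) item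

-- The modify-fold's items are exactly B's dedup-then-filter table.
theorem pvFold_items (users : List (List (String × String))) :
    (List.foldl (fun d (p : String × List (String × String)) => d.modify p.1 [] (· ++ [p.2]))
        PySem.Dict.empty (users.map (fun item => (pvKeyB item, item)))).items
    = (PySem.List.dedup (users.map pvKeyB)).map
        (fun k => (k, users.filter (fun item => pvKeyB item == k))) := by
  set l := users.map (fun item => (pvKeyB item, item)) with hl
  have hnd : (List.foldl (fun d p => d.modify p.1 [] (· ++ [p.2])) PySem.Dict.empty l).keys.Nodup := by
    apply PySem.Dict.nodup_keys_foldl_modify_key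
    simp [pysem]
  rw [PySem.Dict.items_eq_map_keys _ hnd []]
  have hkeys : (List.foldl (fun d p => d.modify p.1 [] (· ++ [p.2])) PySem.Dict.empty l).keys
      = PySem.List.dedup (users.map pvKeyB) := by
    rw [PySem.Dict.keys_foldl_modify_key l (fun p => p.1) [] (fun d p v => v ++ [p.2])]
    simp only [pysem, hl, List.map_map]
    simp [PySem.Set.ofList, List.foldl_map]
  rw [hkeys]
  apply List.map_congr_left
  intro k hk
  congr 1
  rw [PySem.Dict.getD_foldl_modify_append l PySem.Dict.empty k]
  simp [hl, List.filter_map, Function.comp_def]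

-- ===== VERDICT (by name: the statement is the Claim_ definition above) =====
theorem group_users_by_email_domain_spec : Claim_equal_group_users_by_email_domain := by
  intro users _ _
  unfold Spec_group_users_by_email_domain group_users_by_email_domain group_users_by_email_domain_alt
  rw [pvFold_proj users PySem.Dict.empty []]
  show (List.foldl (fun d item => d.modify (pvKeyB item) [] (· ++ [item])) PySem.Dict.empty users).items
      = (PySem.List.dedup (users.map pvKeyB)).map
          (fun k => (k, users.filter (fun item => pvKeyB item == k)))
  have h := pvFold_items users
  rw [List.foldl_map] at h
  exact h
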